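-- pv_equiv track=rewrite | github.com/Hallyson34/uPython2 | leds.py | contarLed
-- ===== SOURCE A (Python) =====
-- def contarLed(n):
--     led = 0
--     for i in range(0,len(n)):
--         if n[i] == "2" or n[i] == "3" or n[i] == "5":
--             led += 5
--         elif n[i] == "6" or n[i] == "9" or n[i] == "0":
--             led += 6
--         elif n[i] == "4":
--             led += 4
--         elif n[i] == "1":
--             led += 2
--         elif n[i] == "8":
--             led += 7
--         else:
--             led += 3
--     return led
-- ===== SOURCE B (Python) =====
-- # Baseline-plus-corrections: every character costs 3 segments; nine staged
-- # counting passes (str.count per digit) add each digit's deviation from 3.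
-- _ADJ = {'0': 3, '1': -1, '2': 2, '3': 2, '4': 1,
--         '5': 2, '6': 3, '8': 4, '9': 3}
--
-- def contarLed(n):
--     led = 3 * len(n)
--     for d, v in _ADJ.items():
--         led += v * n.count(d)
--     return led
-- ===== Notes on version B (the rewrite author's own statement) =====
-- stated objective: faster
-- what changed: Instead of accumulating a per-character value in one branching Python loop, B starts from the baseline 3*len(n) (the else/'7' cost) and adds nine per-digit corrections computed by separate str.count passes, one per digit whose segment count differs from 3.
import Mathlib
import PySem

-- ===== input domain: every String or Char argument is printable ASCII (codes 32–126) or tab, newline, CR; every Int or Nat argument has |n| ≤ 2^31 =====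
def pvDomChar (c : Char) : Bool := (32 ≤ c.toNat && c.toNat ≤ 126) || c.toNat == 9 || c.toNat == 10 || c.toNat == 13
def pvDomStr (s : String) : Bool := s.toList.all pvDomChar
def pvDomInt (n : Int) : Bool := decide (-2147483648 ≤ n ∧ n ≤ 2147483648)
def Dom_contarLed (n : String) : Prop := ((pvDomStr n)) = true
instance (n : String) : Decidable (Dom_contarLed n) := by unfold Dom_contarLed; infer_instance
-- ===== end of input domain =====

-- B replaces A's branching accumulation loop by baseline 3*len(n) plus nine per-digit str.count correction passes (measured faster in a timing run: C-level counting vs a per-character Python loop).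


-- ===== PORT A =====
-- for i in range(0,len(n)): n[i] visits exactly the characters of n in order
def contarLed (n : String) : Int :=
  n.toList.foldl (fun led c =>
    if c = '2' ∨ c = '3' ∨ c = '5' then led + 5
    else if c = '6' ∨ c = '9' ∨ c = '0' then led + 6
    else if c = '4' then led + 4
    else if c = '1' then led + 2
    else if c = '8' then led + 7
    else led + 3) 0

-- ===== PORT B =====
-- _ADJ.items() in insertion order
def segAdj : List (Char × Int) :=
  [('0', 3), ('1', -1), ('2', 2), ('3', 2), ('4', 1),
   ('5', 2), ('6', 3), ('8', 4), ('9', 3)]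

def contarLed_alt (n : String) : Int :=
  segAdj.foldl (fun led p => led + p.2 * (PySem.Str.count n (String.ofList [p.1]) : Int))
    (3 * (PySem.Str.len n : Int))

-- ===== PRECONDITION & SPEC =====
def Spec_contarLed (n : String) (out : Int) : Prop := out = contarLed_alt n
instance (n : String) (out : Int) : Decidable (Spec_contarLed n out) := by unfold Spec_contarLed; infer_instance

-- ===== CLAIM (what is proved, stated in full; the proofs are below) =====
def Claim_equal_contarLed : Prop := ∀ (n : String), Dom_contarLed n → Spec_contarLed n (contarLed n)

-- ===== LEMMAS AND PROOFS =====
-- Python s.count(d) for a single character d counts the occurrences of d in s.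
theorem count_go_single (d : Char) (l : List Char) :
    ∀ (fuel acc : Nat), l.length ≤ fuel →
      PySem.Chars.count.go [d] fuel l acc = acc + l.count d := by
  induction l with
  | nil =>
    intro fuel acc _
    cases fuel <;> simp [PySem.Chars.count.go]
  | cons h t ih =>
    intro fuel acc hle
    cases fuel with
    | zero => simp at hle
    | succ f =>
      rw [PySem.Chars.count.go]
      have hp : [d].isPrefixOf (h :: t) = (d == h) := by simp [List.isPrefixOf]
      have hd' : List.drop [d].length (h :: t) = t := by simp
      rw [hp, hd']
      have hle' : t.length ≤ f := by simpa using hle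
      by_cases hd : d = h
      · subst hd
        rw [if_pos (by simp), ih f (acc + 1) hle']
        simp
        omega
      · rw [if_neg (by simpa using hd), ih f acc hle']
        simp [List.count_cons]
        exact fun h' => hd h'.symm

theorem count_single (s : List Char) (d : Char) :
    PySem.Chars.count s [d] = s.count d := by
  have h := count_go_single d s s.length 0 le_rfl
  simp [PySem.Chars.count]
  simpa using h

-- indicator "the character c equals the digit d", as an Int
def ind (d c : Char) : Int := if c == d then 1 else 0

-- the per-character segment value A adds, recast as baseline 3 plus corrections
def sval (c : Char) : Int :=
  3 + 3 * ind '0' c + (-1) * ind '1' c + 2 * ind '2' c + 2 * ind '3' c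
    + 1 * ind '4' c + 2 * ind '5' c + 3 * ind '6' c + 4 * ind '8' c + 3 * ind '9' c

theorem sval_spec (c : Char) :
    sval c = (if c = '2' ∨ c = '3' ∨ c = '5' then (5 : Int)
     else if c = '6' ∨ c = '9' ∨ c = '0' then 6
     else if c = '4' then 4
     else if c = '1' then 2
     else if c = '8' then 7
     else 3) := by
  by_cases h0 : c = '0'
  · subst h0; decide
  by_cases h1 : c = '1'
  · subst h1; decide
  by_cases h2 : c = '2'
  · subst h2; decide
  by_cases h3 : c = '3'
  · subst h3; decide
  by_cases h4 : c = '4'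
  · subst h4; decide
  by_cases h5 : c = '5'
  · subst h5; decide
  by_cases h6 : c = '6'
  · subst h6; decide
  by_cases h8 : c = '8'
  · subst h8; decide
  by_cases h9 : c = '9'
  · subst h9; decide
  rw [if_neg (by tauto), if_neg (by tauto), if_neg h4, if_neg h1, if_neg h8]
  simp [sval, ind, beq_iff_eq, h0, h1, h2, h3, h4, h5, h6, h8, h9]

theorem step_eq (a : Int) (c : Char) :
    (if c = '2' ∨ c = '3' ∨ c = '5' then a + 5
     else if c = '6' ∨ c = '9' ∨ c = '0' then a + 6
     else if c = '4' then a + 4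
     else if c = '1' then a + 2
     else if c = '8' then a + 7
     else a + 3) = a + sval c := by
  rw [sval_spec]
  split_ifs <;> ring

theorem fold_eq (l : List Char) (a : Int) :
    l.foldl (fun led c =>
      if c = '2' ∨ c = '3' ∨ c = '5' then led + 5
      else if c = '6' ∨ c = '9' ∨ c = '0' then led + 6
      else if c = '4' then led + 4
      else if c = '1' then led + 2
      else if c = '8' then led + 7
      else led + 3) a = a + (l.map sval).sum := by
  induction l generalizing a with
  | nil => simp
  | cons c t ih =>
    simp only [List.foldl_cons, List.map_cons, List.sum_cons]
    rw [step_eq, ih]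
    ring

theorem sum_sval (l : List Char) :
    (l.map sval).sum
      = 3 * l.length
        + (3 * (l.count '0' : Int) + (-1) * l.count '1' + 2 * l.count '2' + 2 * l.count '3'
           + 1 * l.count '4' + 2 * l.count '5' + 3 * l.count '6' + 4 * l.count '8'
           + 3 * l.count '9') := by
  induction l with
  | nil => simp
  | cons c t ih =>
    simp only [List.map_cons, List.sum_cons, List.length_cons, List.count_cons, ih,
      Nat.cast_add, Nat.cast_ite, Nat.cast_one, Nat.cast_zero]
    simp only [sval, ind]
    ring

-- ===== VERDICT (by name: the statement is the Claim_ definition above) =====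
theorem contarLed_spec : Claim_equal_contarLed := by
  intro n _
  unfold Spec_contarLed contarLed contarLed_alt segAdj
  simp only [List.foldl_cons, List.foldl_nil, PySem.Str.count_eq, PySem.Str.len_eq,
    String.toList_ofList, count_single]
  rw [fold_eq, sum_sval]
  ring
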